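-- pv_equiv track=rewrite | github.com/kennonlee/adventofcode2022 | 8a.py | tree_diff_lr
-- ===== SOURCE A (Python) =====
-- def tree_diff_lr(row):
--     ret = []
--     max_height = 0
--     for t in row:
--         cur = t - max_height
--         ret.append(t - max_height)
--         if max_height < t:
--             max_height = t
--     return ret
-- ===== SOURCE B (Python) =====
-- def tree_diff_lr(row):
--     # Divide and conquer: solve(seg, base) returns the diff list for seg given
--     # that base is the max height seen before seg, plus the new max including seg.
--     def solve(seg, base):
--         if len(seg) == 0:
--             return [], base
--         if len(seg) == 1:
--             t = seg[0]
--             return [t - base], max(base, t)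
--         mid = len(seg) // 2
--         dl, ml = solve(seg[:mid], base)
--         dr, mr = solve(seg[mid:], ml)
--         return dl + dr, mr
--     return solve(row, 0)[0]
-- ===== Notes on version B (the rewrite author's own statement) =====
-- stated objective: alternative
-- what changed: Replaces A's single iterative pass with a carried running maximum by a recursive divide-and-conquer: each segment is split in half, the two halves are solved independently of the loop (the left half's returned maximum seeds the right half), and the diff lists are concatenated.
import Mathlib
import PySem

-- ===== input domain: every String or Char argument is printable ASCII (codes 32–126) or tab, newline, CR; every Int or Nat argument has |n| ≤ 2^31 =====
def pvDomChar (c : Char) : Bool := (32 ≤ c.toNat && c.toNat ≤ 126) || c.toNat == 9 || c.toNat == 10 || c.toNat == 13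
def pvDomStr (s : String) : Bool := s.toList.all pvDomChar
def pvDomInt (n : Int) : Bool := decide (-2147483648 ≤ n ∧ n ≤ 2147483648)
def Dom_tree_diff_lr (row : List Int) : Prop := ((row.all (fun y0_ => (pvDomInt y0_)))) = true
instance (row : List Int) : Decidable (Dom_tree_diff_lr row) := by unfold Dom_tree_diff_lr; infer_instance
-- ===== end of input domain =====

-- B replaces A's single accumulator loop by a recursive divide-and-conquer over halves
-- of the row (alternative decomposition; the left half's returned max seeds the right half).

-- ===== PORT A =====
-- loop over row with accumulator max_height, appending t - max_height and conditionally updating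
def tree_diff_lr_go (row : List Int) (max_height : Int) : List Int :=
  match row with
  | [] => []
  | t :: ts =>
      (t - max_height) :: tree_diff_lr_go ts (if max_height < t then t else max_height)

def tree_diff_lr (row : List Int) : List Int := tree_diff_lr_go row 0

-- ===== PORT B =====
-- solve(seg, base): empty/singleton base cases, else split at len//2, solve the left
-- half from base, the right half from the left's returned max, concatenate the diffs.
-- (seg[0] on the length-1 branch is headI: the list there is nonempty, so it is exact.)
def tdl_solve (seg : List Int) (base : Int) : List Int × Int :=
  if seg.length = 0 then ([], base)
  else if seg.length = 1 then
    ([seg.headI - base], max base seg.headI)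
  else
    let mid := seg.length / 2
    let l := tdl_solve (seg.take mid) base
    let r := tdl_solve (seg.drop mid) l.2
    (l.1 ++ r.1, r.2)
termination_by seg.length
decreasing_by
  · simp; omega
  · simp; omega

def tree_diff_lr_alt (row : List Int) : List Int := (tdl_solve row 0).1

-- ===== PRECONDITION & SPEC =====
def Spec_tree_diff_lr (row : List Int) (out : List Int) : Prop := out = tree_diff_lr_alt row
instance (row : List Int) (out : List Int) : Decidable (Spec_tree_diff_lr row out) := by unfold Spec_tree_diff_lr; infer_instance

-- ===== CLAIM (what is proved, stated in full; the proofs are below) =====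
def Claim_equal_tree_diff_lr : Prop := ∀ (row : List Int), Dom_tree_diff_lr row → Spec_tree_diff_lr row (tree_diff_lr row)

-- ===== LEMMAS AND PROOFS =====
theorem tree_diff_lr_go_update (m t : Int) :
    (if m < t then t else m) = max m t := by
  rcases lt_or_ge m t with h | h
  · simp [if_pos h, max_eq_right (le_of_lt h)]
  · simp [if_neg (not_lt.mpr h), max_eq_left h]

theorem tree_diff_lr_go_append (l r : List Int) : ∀ (m : Int),
    tree_diff_lr_go (l ++ r) m =
      tree_diff_lr_go l m ++ tree_diff_lr_go r (l.foldl max m) := by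
  induction l with
  | nil => intro m; simp [tree_diff_lr_go]
  | cons t ts ih =>
      intro m
      simp [tree_diff_lr_go, tree_diff_lr_go_update, ih (max m t)]

theorem tdl_solve_eq (n : Nat) : ∀ (seg : List Int), seg.length ≤ n → ∀ (base : Int),
    tdl_solve seg base = (tree_diff_lr_go seg base, seg.foldl max base) := by
  induction n with
  | zero =>
      intro seg hlen base
      have : seg = [] := List.eq_nil_of_length_eq_zero (Nat.le_zero.mp hlen)
      subst this
      rw [tdl_solve.eq_def]; simp [tree_diff_lr_go]
  | succ n ih =>
      intro seg hlen base
      rw [tdl_solve.eq_def]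
      by_cases h0 : seg.length = 0
      · have : seg = [] := List.eq_nil_of_length_eq_zero h0
        subst this; simp [tree_diff_lr_go]
      · by_cases h1 : seg.length = 1
        · obtain ⟨t, rfl⟩ := List.length_eq_one_iff.mp h1
          simp [tree_diff_lr_go]
        · have ihl := ih (seg.take (seg.length / 2)) (by simp; omega) base
          simp only [if_neg h0, if_neg h1, ihl]
          have ihr := ih (seg.drop (seg.length / 2)) (by simp; omega)
            ((seg.take (seg.length / 2)).foldl max base)
          simp only [ihr]
          have hsplit : seg.take (seg.length / 2) ++ seg.drop (seg.length / 2) = seg :=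
            List.take_append_drop _ _
          conv_rhs => rw [← hsplit]
          rw [tree_diff_lr_go_append, List.foldl_append]

theorem tree_diff_lr_eq_alt (row : List Int) : tree_diff_lr row = tree_diff_lr_alt row := by
  have h := tdl_solve_eq row.length row (le_refl _) 0
  simp [tree_diff_lr, tree_diff_lr_alt, h]

-- ===== VERDICT (by name: the statement is the Claim_ definition above) =====
theorem tree_diff_lr_spec : Claim_equal_tree_diff_lr := by
  intro row _
  exact tree_diff_lr_eq_alt row
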